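-- pv_equiv track=rewrite | github.com/apapadopoulos22/orfeas-ai-studio | fix_markdown_lint.py | fix_fenced_code_blocks
-- ===== SOURCE A (Python) =====
-- from typing import List, Tuple
--
-- def fix_fenced_code_blocks(content: str) -> Tuple[str, int]:
--     """Fix MD031: Fenced code blocks should be surrounded by blank lines"""
--     fixes = 0
--     lines = content.split('\n')
--     new_lines = []
--     in_code_block = False
--
--     for i, line in enumerate(lines):
--         # Check if this is a code fence
--         if line.strip().startswith('```'):
--             if not in_code_block:
--                 # Opening fence - ensure blank line before
--                 if i > 0 and lines[i-1].strip() != '':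
--                     new_lines.append('')
--                     fixes += 1
--                 in_code_block = True
--             else:
--                 # Closing fence - ensure blank line after
--                 in_code_block = False
--                 new_lines.append(line)
--                 if i < len(lines) - 1 and lines[i+1].strip() != '':
--                     new_lines.append('')
--                     fixes += 1
--                 continue
--
--         new_lines.append(line)
--
--     return '\n'.join(new_lines), fixes
-- ===== SOURCE B (Python) =====
-- def _alternate(xs):
--     """Split a list into (elements at even positions, elements at odd positions)."""
--     if not xs:
--         return [], []
--     a, b = _alternate(xs[1:])
--     return [xs[0]] + b, a
--
--
-- def fix_fenced_code_blocks(content: str):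
--     """Fix MD031: Fenced code blocks should be surrounded by blank lines"""
--     lines = content.split('\n')
--     n = len(lines)
--     fence = [i for i, l in enumerate(lines) if l.strip().startswith('```')]
--     op, cl = _alternate(fence)
--     opening = set(op)
--     closing = set(cl)
--
--     def seg(i):
--         line = lines[i]
--         if i in opening and i > 0 and lines[i - 1].strip() != '':
--             return ['', line]
--         if i in closing and i + 1 < n and lines[i + 1].strip() != '':
--             return [line, '']
--         return [line]
--
--     segs = [seg(i) for i in range(n)]
--     out = [x for s in segs for x in s]
--     return '\n'.join(out), sum(len(s) - 1 for s in segs)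
-- ===== Notes on version B (the rewrite author's own statement) =====
-- stated objective: alternative
-- what changed: A makes one stateful pass with an in_code_block toggle deciding per line whether to prepend or append a blank; B instead first collects the fence-line indices, splits them by alternation into opening/closing sets, then builds an independent 1- or 2-line segment for every line, flattens the segments and derives the fix count from the segment lengths.
import Mathlib
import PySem

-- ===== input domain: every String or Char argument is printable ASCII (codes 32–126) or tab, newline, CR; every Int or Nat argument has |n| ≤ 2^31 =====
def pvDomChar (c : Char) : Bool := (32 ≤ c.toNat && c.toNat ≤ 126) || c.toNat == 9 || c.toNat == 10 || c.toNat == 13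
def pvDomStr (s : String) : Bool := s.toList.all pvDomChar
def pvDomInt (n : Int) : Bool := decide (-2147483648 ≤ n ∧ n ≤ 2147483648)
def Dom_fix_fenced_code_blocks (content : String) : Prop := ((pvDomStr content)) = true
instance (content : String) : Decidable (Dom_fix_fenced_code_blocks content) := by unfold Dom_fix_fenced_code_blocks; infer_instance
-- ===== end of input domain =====

-- B (alternative decomposition, same cost): instead of A's single stateful pass with an
-- in_code_block toggle, B first collects the fence-line indices, splits them into
-- opening/closing by alternation, then builds an independent 1- or 2-line segment per input
-- line and flattens; the fix count is derived from the segment lengths.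

-- ===== PORT A =====
-- line.strip().startswith('```')
def pvFence (line : String) : Bool := PySem.Str.startswith (PySem.Str.strip line) "```"

-- the body of A's 'for i, line in enumerate(lines)' loop; state = (new_lines, fixes, in_code_block)
def pvStepA (lines : List String) (st : List String × Int × Bool) (p : Int × String) :
    List String × Int × Bool :=
  let new_lines := st.1
  let fixes := st.2.1
  let in_code_block := st.2.2
  let i := p.1
  let line := p.2
  if pvFence line then
    if !in_code_block then
      -- opening fence: ensure blank line before, set in_code_block, fall through to append
      let (new_lines, fixes) :=
        if i > 0 ∧ PySem.Str.strip (PySem.List.pyGetD lines (i - 1) "") ≠ "" then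
          (new_lines ++ [""], fixes + 1)
        else (new_lines, fixes)
      (new_lines ++ [line], fixes, true)
    else
      -- closing fence: append line, ensure blank line after, 'continue'
      let new_lines := new_lines ++ [line]
      if i < (lines.length : Int) - 1 ∧
          PySem.Str.strip (PySem.List.pyGetD lines (i + 1) "") ≠ "" then
        (new_lines ++ [""], fixes + 1, false)
      else (new_lines, fixes, false)
  else (new_lines ++ [line], fixes, in_code_block)

def fix_fenced_code_blocks (content : String) : String × Int :=
  let lines := (PySem.Str.split? content "\n").getD []
  let st := (PySem.List.enumerate lines).foldl (pvStepA lines) ([], 0, false)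
  (PySem.Str.join "\n" st.1, st.2.1)

-- ===== PORT B =====
-- _alternate(xs): split a list into the elements at even and at odd positions
def pvAlternate {α : Type} : List α → List α × List α
  | [] => ([], [])
  | x :: t => let p := pvAlternate t; (x :: p.2, p.1)

-- seg(i) of Source B
def pvSegB (lines : List String) (n : Int) (opening closing : PySem.Set Int) (i : Int) :
    List String :=
  let line := PySem.List.pyGetD lines i ""
  if PySem.Set.contains opening i ∧ i > 0 ∧
      PySem.Str.strip (PySem.List.pyGetD lines (i - 1) "") ≠ "" then
    ["", line]
  else if PySem.Set.contains closing i ∧ i + 1 < n ∧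
      PySem.Str.strip (PySem.List.pyGetD lines (i + 1) "") ≠ "" then
    [line, ""]
  else [line]

def fix_fenced_code_blocks_alt (content : String) : String × Int :=
  let lines := (PySem.Str.split? content "\n").getD []
  let n : Int := (lines.length : Int)
  let fence := ((PySem.List.enumerate lines).filter (fun p => pvFence p.2)).map (·.1)
  let p := pvAlternate fence
  let opening : PySem.Set Int := PySem.Set.ofList p.1
  let closing : PySem.Set Int := PySem.Set.ofList p.2
  let segs := (PySem.List.pyRange 0 n).map (pvSegB lines n opening closing)
  (PySem.Str.join "\n" segs.flatten, (segs.map (fun s => (s.length : Int) - 1)).sum)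

-- ===== PRECONDITION & SPEC =====
def Spec_fix_fenced_code_blocks (content : String) (out : String × Int) : Prop := out = fix_fenced_code_blocks_alt content
instance (content : String) (out : String × Int) : Decidable (Spec_fix_fenced_code_blocks content out) := by unfold Spec_fix_fenced_code_blocks; infer_instance

-- ===== CLAIM (what is proved, stated in full; the proofs are below) =====
def Claim_equal_fix_fenced_code_blocks : Prop := ∀ (content : String), Dom_fix_fenced_code_blocks content → Spec_fix_fenced_code_blocks content (fix_fenced_code_blocks content)

-- ===== LEMMAS AND PROOFS =====

-- closed forms used by both sides
def pvF (lines : List String) (k : Nat) : Bool := pvFence (lines.getD k "")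
def pvCnt (lines : List String) (k : Nat) : Nat := (List.range k).countP (pvF lines)

def pvSegN (lines : List String) (k : Nat) : List String :=
  let line := lines.getD k ""
  if pvF lines k then
    if pvCnt lines k % 2 = 0 then
      if 0 < k ∧ PySem.Str.strip (lines.getD (k - 1) "") ≠ "" then ["", line] else [line]
    else
      if k + 1 < lines.length ∧ PySem.Str.strip (lines.getD (k + 1) "") ≠ "" then [line, ""]
      else [line]
  else [line]

def pvExtra (lines : List String) (k : Nat) : Int := ((pvSegN lines k).length : Int) - 1

lemma pvFence_default : pvFence "" = false := by decide

lemma pvCnt_stable (lines : List String) {k : Nat} (h : lines.length ≤ k) :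
    pvCnt lines k = pvCnt lines lines.length := by
  unfold pvCnt
  induction k, h using Nat.le_induction with
  | base => rfl
  | succ k hk ih =>
    rw [List.range_succ, List.countP_append, ← ih]
    have hF : pvF lines k = false := by
      unfold pvF
      rw [List.getD_eq_default _ _ (by omega)]
      exact pvFence_default
    simp [hF]

lemma pvCnt_succ (lines : List String) (k : Nat) :
    pvCnt lines (k + 1) = pvCnt lines k + (if pvF lines k then 1 else 0) := by
  simp [pvCnt, List.range_succ, List.countP_append, List.countP_cons]

-- pyRange 0 n is the cast of range n
lemma pyRange_natCast (n : Nat) :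
    PySem.List.pyRange 0 (n : Int) = (List.range n).map (fun (k : Nat) => (k : Int)) := by
  rw [PySem.List.pyRange_one]
  simp

-- the fence-index list, characterised
lemma fence_eq (lines : List String) :
    ((PySem.List.enumerate lines).filter (fun p => pvFence p.2)).map (·.1)
      = ((List.range lines.length).filter (pvF lines)).map (fun (k : Nat) => (k : Int)) := by
  rw [PySem.List.enumerate_eq_map_pyRange lines ""]
  simp only [PySem.List.len_eq]
  rw [pyRange_natCast]
  simp only [List.map_map, List.filter_map, Function.comp_def]
  simp only [PySem.List.pyGetD_natCast]
  rfl

lemma idxOf_map_natCast (l : List Nat) (k : Nat) :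
    List.idxOf (k : Int) (l.map (fun (j : Nat) => (j : Int))) = List.idxOf k l := by
  induction l with
  | nil => simp
  | cons a t ih =>
    rw [List.map_cons, List.idxOf_cons, List.idxOf_cons]
    by_cases h : a = k
    · simp [h]
    · have h1 : ((a : Int) == (k : Int)) = false := by simp [h]
      have h2 : (a == k) = false := by simp [h]
      rw [h1, h2]
      simp [ih]

lemma idxOf_filter_range (P : Nat → Bool) (n : Nat) :
    ∀ k, k < n → P k = true →
      List.idxOf k ((List.range n).filter P) = (List.range k).countP P := by
  induction n with
  | zero => intro k hk; omega
  | succ n ih =>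
    intro k hk hP
    rw [List.range_succ, List.filter_append]
    by_cases hkn : k < n
    · rw [List.idxOf_append, if_pos (by simp [List.mem_filter, List.mem_range]; exact ⟨hkn, hP⟩)]
      exact ih k hkn hP
    · have hk' : k = n := by omega
      subst hk'
      have hnot : k ∉ (List.range k).filter P := by
        intro hmem
        have := List.mem_range.mp (List.mem_filter.mp hmem).1
        omega
      rw [List.idxOf_append, if_neg hnot]
      rw [List.filter_cons, if_pos hP]
      simp [List.countP_eq_length_filter]

lemma mem_alternate {α : Type} [BEq α] [LawfulBEq α] (l : List α) (hnd : l.Nodup) (x : α) :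
    (x ∈ (pvAlternate l).1 ↔ x ∈ l ∧ List.idxOf x l % 2 = 0) ∧
    (x ∈ (pvAlternate l).2 ↔ x ∈ l ∧ List.idxOf x l % 2 = 1) := by
  induction l with
  | nil => simp [pvAlternate]
  | cons a t ih =>
    have hnd' := (List.nodup_cons.mp hnd).2
    have ha := (List.nodup_cons.mp hnd).1
    obtain ⟨ih1, ih2⟩ := ih hnd'
    by_cases hx : x = a
    · subst hx
      have hbeq : (x == x) = true := by simp
      constructor
      · simp [pvAlternate]
      · simp only [pvAlternate, List.idxOf_cons, hbeq, cond_true]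
        constructor
        · intro hmem
          exact absurd (ih1.mp hmem).1 ha
        · intro ⟨_, hmod⟩
          omega
    · have hbeq : (a == x) = false := by simp [Ne.symm hx]
      constructor
      · simp only [pvAlternate, List.mem_cons, List.idxOf_cons, hbeq, cond_false]
        rw [ih2]
        constructor
        · intro h
          rcases h with h | h
          · exact absurd h hx
          · exact ⟨Or.inr h.1, by omega⟩
        · intro ⟨hm, hmod⟩
          rcases hm with hm | hm
          · exact absurd hm hx
          · exact Or.inr ⟨hm, by omega⟩
      · simp only [pvAlternate, List.mem_cons, List.idxOf_cons, hbeq, cond_false]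
        rw [ih1]
        constructor
        · intro ⟨hm, hmod⟩
          exact ⟨Or.inr hm, by omega⟩
        · intro ⟨hm, hmod⟩
          rcases hm with hm | hm
          · exact absurd hm hx
          · exact ⟨hm, by omega⟩

lemma contains_set_iff (l : List Int) (x : Int) :
    PySem.Set.contains (PySem.Set.ofList l) x = decide (x ∈ l) := by
  have h : PySem.Set.contains (PySem.Set.ofList l) x
      = decide (x ∈ PySem.Set.ofList l) := by
    simp [PySem.Set.contains, List.contains_eq_mem]
  rw [h]
  simp [PySem.Set.mem_ofList]

-- the fence list as Nat indices
def pvFenceN (lines : List String) : List Nat := (List.range lines.length).filter (pvF lines)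

lemma nodup_fenceInt (lines : List String) :
    ((pvFenceN lines).map (fun (k : Nat) => (k : Int))).Nodup :=
  ((List.nodup_range).filter _).map (fun _ _ h => by exact_mod_cast h)

lemma mem_fenceInt (lines : List String) (k : Nat) :
    (k : Int) ∈ (pvFenceN lines).map (fun (k : Nat) => (k : Int))
      ↔ k < lines.length ∧ pvF lines k = true := by
  constructor
  · intro h
    obtain ⟨j, hj, hjk⟩ := List.mem_map.mp h
    have hjmem := List.mem_filter.mp hj
    have : j = k := by exact_mod_cast hjk
    subst this
    exact ⟨List.mem_range.mp hjmem.1, hjmem.2⟩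
  · intro ⟨h1, h2⟩
    exact List.mem_map.mpr ⟨k, List.mem_filter.mpr ⟨List.mem_range.mpr h1, h2⟩, rfl⟩

set_option maxHeartbeats 1000000 in
lemma segB_eq_segN (lines : List String) {k : Nat} (hk : k < lines.length) :
    pvSegB lines (lines.length : Int)
        (PySem.Set.ofList (pvAlternate (((PySem.List.enumerate lines).filter
            (fun p => pvFence p.2)).map (·.1))).1)
        (PySem.Set.ofList (pvAlternate (((PySem.List.enumerate lines).filter
            (fun p => pvFence p.2)).map (·.1))).2)
        (k : Int)
      = pvSegN lines k := by
  have hfe : ((PySem.List.enumerate lines).filter (fun p => pvFence p.2)).map (·.1)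
      = (pvFenceN lines).map (fun (k : Nat) => (k : Int)) := fence_eq lines
  have hmem := mem_alternate _ (nodup_fenceInt lines) ((k : Int))
  have hidx : pvF lines k = true →
      List.idxOf ((k : Int)) ((pvFenceN lines).map (fun (j : Nat) => (j : Int))) = pvCnt lines k := by
    intro hF
    rw [idxOf_map_natCast]
    exact idxOf_filter_range (pvF lines) lines.length k hk hF
  have hO : PySem.Set.contains (PySem.Set.ofList
      (pvAlternate (((PySem.List.enumerate lines).filter
          (fun p => pvFence p.2)).map (·.1))).1) ((k : Int))
      = (pvF lines k && decide (pvCnt lines k % 2 = 0)) := by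
    rw [hfe, contains_set_iff]
    by_cases hF : pvF lines k = true
    · rw [hF]
      simp only [Bool.true_and, decide_eq_decide]
      rw [hmem.1, mem_fenceInt, hidx hF]
      exact ⟨fun h => h.2, fun h => ⟨⟨hk, hF⟩, h⟩⟩
    · have hF' : pvF lines k = false := by simpa using hF
      rw [hF']
      simp only [Bool.false_and, decide_eq_false_iff_not]
      rw [hmem.1, mem_fenceInt]
      intro h
      rw [hF'] at h
      exact Bool.false_ne_true h.1.2
  have hC : PySem.Set.contains (PySem.Set.ofList
      (pvAlternate (((PySem.List.enumerate lines).filter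
          (fun p => pvFence p.2)).map (·.1))).2) ((k : Int))
      = (pvF lines k && decide (pvCnt lines k % 2 = 1)) := by
    rw [hfe, contains_set_iff]
    by_cases hF : pvF lines k = true
    · rw [hF]
      simp only [Bool.true_and, decide_eq_decide]
      rw [hmem.2, mem_fenceInt, hidx hF]
      exact ⟨fun h => h.2, fun h => ⟨⟨hk, hF⟩, h⟩⟩
    · have hF' : pvF lines k = false := by simpa using hF
      rw [hF']
      simp only [Bool.false_and, decide_eq_false_iff_not]
      rw [hmem.2, mem_fenceInt]
      intro h
      rw [hF'] at h
      exact Bool.false_ne_true h.1.2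
  have hget : PySem.List.pyGetD lines ((k : Int)) "" = lines.getD k "" :=
    PySem.List.pyGetD_natCast lines k ""
  have hPQ : ((k : Int) > 0 ∧
        ¬PySem.Str.strip (PySem.List.pyGetD lines ((k : Int) - 1) "") = "")
      = (0 < k ∧ ¬PySem.Str.strip (lines.getD (k - 1) "") = "") := by
    apply propext
    by_cases hk0 : 0 < k
    · have hgm1 : PySem.List.pyGetD lines ((k : Int) - 1) "" = lines.getD (k - 1) "" := by
        rw [show ((k : Int) - 1) = ((k - 1 : Nat) : Int) by omega]
        exact PySem.List.pyGetD_natCast lines (k - 1) ""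
      rw [hgm1]
      exact ⟨fun h => ⟨hk0, h.2⟩, fun h => ⟨by exact_mod_cast hk0, h.2⟩⟩
    · exact ⟨fun h => absurd (by exact_mod_cast h.1 : 0 < k) hk0, fun h => absurd h.1 hk0⟩
  have hP2Q2 : ((k : Int) + 1 < (lines.length : Int) ∧
        ¬PySem.Str.strip (PySem.List.pyGetD lines ((k : Int) + 1) "") = "")
      = (k + 1 < lines.length ∧ ¬PySem.Str.strip (lines.getD (k + 1) "") = "") := by
    have hget1 : PySem.List.pyGetD lines ((k : Int) + 1) "" = lines.getD (k + 1) "" := by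
      rw [show ((k : Int) + 1) = ((k + 1 : Nat) : Int) by push_cast; ring]
      exact PySem.List.pyGetD_natCast lines (k + 1) ""
    rw [hget1]
    apply propext
    exact ⟨fun h => ⟨by exact_mod_cast h.1, h.2⟩, fun h => ⟨by exact_mod_cast h.1, h.2⟩⟩
  simp only [pvSegB, pvSegN, hO, hC, hget, hPQ, hP2Q2]
  by_cases hF : pvF lines k = true
  · rw [hF]
    simp only [Bool.true_and]
    by_cases hpar : pvCnt lines k % 2 = 0
    · have h0 : decide (pvCnt lines k % 2 = 0) = true := by simpa using hpar
      have h1 : decide (pvCnt lines k % 2 = 1) = false := by simp; omega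
      rw [h0, h1]
      simp only [true_and, Bool.false_eq_true, false_and, if_pos hpar]
      split_ifs <;> simp_all
    · have h0 : decide (pvCnt lines k % 2 = 0) = false := by simpa using hpar
      have h1 : decide (pvCnt lines k % 2 = 1) = true := by simp; omega
      rw [h0, h1]
      simp only [true_and, Bool.false_eq_true, false_and, if_neg hpar]
      split_ifs <;> simp_all
  · have hF' : pvF lines k = false := by simpa using hF
    rw [hF']
    simp [Bool.false_and, Bool.false_eq_true, false_and]

-- one step of A's loop equals one closed-form segment
set_option maxHeartbeats 1000000 in
lemma stepA_eq (lines : List String) (k : Nat) (acc : List String) (fx : Int) :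
    pvStepA lines (acc, fx, decide (pvCnt lines k % 2 = 1)) ((k : Int), lines.getD k "")
      = (acc ++ pvSegN lines k, fx + pvExtra lines k, decide (pvCnt lines (k + 1) % 2 = 1)) := by
  have hPQ : ((k : Int) > 0 ∧
        ¬PySem.Str.strip (PySem.List.pyGetD lines ((k : Int) - 1) "") = "")
      = (0 < k ∧ ¬PySem.Str.strip (lines.getD (k - 1) "") = "") := by
    apply propext
    by_cases hk0 : 0 < k
    · have hgm1 : PySem.List.pyGetD lines ((k : Int) - 1) "" = lines.getD (k - 1) "" := by
        rw [show ((k : Int) - 1) = ((k - 1 : Nat) : Int) by omega]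
        exact PySem.List.pyGetD_natCast lines (k - 1) ""
      rw [hgm1]
      exact ⟨fun h => ⟨hk0, h.2⟩, fun h => ⟨by exact_mod_cast hk0, h.2⟩⟩
    · exact ⟨fun h => absurd (by exact_mod_cast h.1 : 0 < k) hk0, fun h => absurd h.1 hk0⟩
  have hP2Q2 : ((k : Int) < (lines.length : Int) - 1 ∧
        ¬PySem.Str.strip (PySem.List.pyGetD lines ((k : Int) + 1) "") = "")
      = (k + 1 < lines.length ∧ ¬PySem.Str.strip (lines.getD (k + 1) "") = "") := by
    have hget1 : PySem.List.pyGetD lines ((k : Int) + 1) "" = lines.getD (k + 1) "" := by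
      rw [show ((k : Int) + 1) = ((k + 1 : Nat) : Int) by push_cast; ring]
      exact PySem.List.pyGetD_natCast lines (k + 1) ""
    rw [hget1]
    apply propext
    exact ⟨fun h => ⟨by omega, h.2⟩, fun h => ⟨by omega, h.2⟩⟩
  simp only [pvStepA, pvSegN, pvExtra, hPQ, hP2Q2]
  by_cases hF : pvF lines k = true
  · have hFence : pvFence (lines.getD k "") = true := hF
    have hsucc : pvCnt lines (k + 1) = pvCnt lines k + 1 := by
      rw [pvCnt_succ, if_pos hF]
    rw [if_pos hFence, if_pos hF]
    by_cases hpar : pvCnt lines k % 2 = 0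
    · have hin : decide (pvCnt lines k % 2 = 1) = false := by simp; omega
      have hout : decide (pvCnt lines (k + 1) % 2 = 1) = true := by
        rw [hsucc]; simp; omega
      rw [hin, hout]
      simp only [Bool.not_false, if_pos hpar]
      split_ifs <;> simp [List.append_assoc]
    · have hin : decide (pvCnt lines k % 2 = 1) = true := by simp; omega
      have hout : decide (pvCnt lines (k + 1) % 2 = 1) = false := by
        rw [hsucc]; simp; omega
      rw [hin, hout]
      simp only [Bool.not_true, Bool.false_eq_true, if_false, if_neg hpar]
      split_ifs <;> simp [List.append_assoc]
  · have hF' : pvF lines k = false := by simpa using hF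
    have hFence : pvFence (lines.getD k "") = false := hF'
    have hout : decide (pvCnt lines (k + 1) % 2 = 1) = decide (pvCnt lines k % 2 = 1) := by
      rw [pvCnt_succ, if_neg (by simp [hF'])]
      norm_num
    rw [if_neg (by rw [hFence]; exact Bool.false_ne_true), if_neg (by rw [hF']; exact Bool.false_ne_true)]
    rw [hout]
    simp

-- the A-side loop, characterised
lemma A_loop (lines : List String) :
    ∀ (l : List String) (k : Nat) (acc : List String) (fx : Int),
      l = lines.drop k →
      (PySem.List.enumerate l (k : Int)).foldl (pvStepA lines)
          (acc, fx, decide (pvCnt lines k % 2 = 1))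
        = (acc ++ ((List.range' k (lines.length - k)).map (pvSegN lines)).flatten,
           fx + ((List.range' k (lines.length - k)).map (pvExtra lines)).sum,
           decide (pvCnt lines lines.length % 2 = 1)) := by
  intro l
  induction l with
  | nil =>
    intro k acc fx h
    have hn : lines.length ≤ k := List.drop_eq_nil_iff.mp h.symm
    have h0 : lines.length - k = 0 := by omega
    rw [h0]
    simp [PySem.List.enumerate, pvCnt_stable lines hn]
  | cons x t ih =>
    intro k acc fx h
    have hk : k < lines.length := by
      by_contra h'
      rw [List.drop_eq_nil_iff.mpr (by omega)] at h
      exact List.cons_ne_nil x t h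
    have hx : x = lines.getD k "" := by
      have h1 : lines[k + 0]? = some x := by
        rw [← List.getElem?_drop, ← h]
        rfl
      rw [Nat.add_zero] at h1
      simp [List.getD_eq_getElem?_getD, h1]
    have ht : t = lines.drop (k + 1) := by
      have hdd : (x :: t).drop 1 = (lines.drop k).drop 1 := by rw [h]
      simpa [List.drop_drop] using hdd
    rw [PySem.List.enumerate_cons, List.foldl_cons]
    rw [hx, stepA_eq lines k]
    have hcast : ((k : Int) + 1) = (((k + 1 : Nat)) : Int) := by push_cast; ring
    rw [hcast]
    rw [ih (k + 1) (acc ++ pvSegN lines k) (fx + pvExtra lines k) ht]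
    have hnk : lines.length - k = (lines.length - (k + 1)) + 1 := by omega
    rw [hnk, List.range'_succ]
    simp [List.append_assoc, add_assoc]

set_option maxHeartbeats 1000000 in
lemma main_eq (lines : List String) :
    ((PySem.Str.join "\n"
        (((PySem.List.enumerate lines).foldl (pvStepA lines) ([], 0, false)).1),
      ((PySem.List.enumerate lines).foldl (pvStepA lines) ([], 0, false)).2.1) : String × Int)
    = ((PySem.Str.join "\n"
          (((PySem.List.pyRange 0 (lines.length : Int)).map
            (pvSegB lines (lines.length : Int)
              (PySem.Set.ofList (pvAlternate (((PySem.List.enumerate lines).filter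
                  (fun p => pvFence p.2)).map (·.1))).1)
              (PySem.Set.ofList (pvAlternate (((PySem.List.enumerate lines).filter
                  (fun p => pvFence p.2)).map (·.1))).2))).flatten),
        (((PySem.List.pyRange 0 (lines.length : Int)).map
            (pvSegB lines (lines.length : Int)
              (PySem.Set.ofList (pvAlternate (((PySem.List.enumerate lines).filter
                  (fun p => pvFence p.2)).map (·.1))).1)
              (PySem.Set.ofList (pvAlternate (((PySem.List.enumerate lines).filter
                  (fun p => pvFence p.2)).map (·.1))).2))).map
          (fun s => ((s.length : Int) - 1))).sum) : String × Int) := by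
  have hsegs : (PySem.List.pyRange 0 (lines.length : Int)).map
      (pvSegB lines (lines.length : Int)
        (PySem.Set.ofList (pvAlternate (((PySem.List.enumerate lines).filter
            (fun p => pvFence p.2)).map (·.1))).1)
        (PySem.Set.ofList (pvAlternate (((PySem.List.enumerate lines).filter
            (fun p => pvFence p.2)).map (·.1))).2))
      = (List.range lines.length).map (pvSegN lines) := by
    rw [pyRange_natCast, List.map_map]
    apply List.map_congr_left
    intro k hkmem
    simp only [Function.comp_apply]
    exact segB_eq_segN lines (List.mem_range.mp hkmem)
  have hinit : (([], 0, false) : List String × Int × Bool)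
      = (([], 0, decide (pvCnt lines 0 % 2 = 1)) : List String × Int × Bool) := by
    simp [pvCnt]
  have hA := A_loop lines lines 0 [] 0 (by simp)
  rw [Nat.cast_zero] at hA
  rw [hinit, hA, hsegs]
  simp only [Nat.sub_zero, List.range_eq_range', List.nil_append, zero_add]
  congr 1
  rw [List.map_map]
  apply congrArg List.sum
  apply List.map_congr_left
  intro k _
  simp [pvExtra]

-- ===== VERDICT (by name: the statement is the Claim_ definition above) =====
theorem fix_fenced_code_blocks_spec : Claim_equal_fix_fenced_code_blocks := by
  intro content _
  show fix_fenced_code_blocks content = fix_fenced_code_blocks_alt content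
  simp only [fix_fenced_code_blocks, fix_fenced_code_blocks_alt]
  exact main_eq _
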